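-- pv_equiv track=rewrite | github.com/mookss123/Bond_Search | app.py | calc_coupon_months
-- ===== SOURCE A (Python) =====
-- MONTH_NAMES = ["Jan","Feb","Mar","Apr","May","Jun",
--                "Jul","Aug","Sep","Oct","Nov","Dec"]
--
-- def calc_coupon_months(first_pay, cycle_en, cycle_orig):
--     if not first_pay or first_pay == "—": return "—"
--     try: month = int(str(first_pay)[5:7])
--     except: return "—"
--     cv = str(cycle_en).lower()
--     if "monthly" in cv:     interval = 1
--     elif "quarterly" in cv: interval = 3
--     elif "semi" in cv:      interval = 6
--     elif "annual" in cv:    interval = 12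
--     else:
--         interval = {"1":12,"2":6,"3":3,"4":1}.get(str(cycle_orig).strip(), 0)
--         if not interval: return f"({cycle_en or cycle_orig})"
--     months = sorted({((month-1+i*interval)%12)+1 for i in range(12//interval)})
--     return ", ".join(MONTH_NAMES[m-1] for m in months)
-- ===== SOURCE B (Python) =====
-- MONTH_NAMES = ["Jan","Feb","Mar","Apr","May","Jun",
--                "Jul","Aug","Sep","Oct","Nov","Dec"]
--
-- _CYCLE_WORDS = [("monthly", 1), ("quarterly", 3), ("semi", 6), ("annual", 12)]
-- _ORIG_CODES = {"1": 12, "2": 6, "3": 3, "4": 1}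
--
--
-- def _interval(cycle_en, cycle_orig):
--     """First matching cycle word wins; otherwise the numeric code, 0 if unknown."""
--     cv = str(cycle_en).lower()
--     for word, iv in _CYCLE_WORDS:
--         if word in cv:
--             return iv
--     return _ORIG_CODES.get(str(cycle_orig).strip(), 0)
--
--
-- def calc_coupon_months(first_pay, cycle_en, cycle_orig):
--     if not first_pay or first_pay == "—":
--         return "—"
--     try:
--         month = int(str(first_pay)[5:7])
--     except ValueError:
--         return "—"
--     interval = _interval(cycle_en, cycle_orig)
--     if not interval:
--         return f"({cycle_en or cycle_orig})"
--     # months in calendar order by congruence: no set, no sort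
--     return ", ".join(MONTH_NAMES[m - 1]
--                      for m in range(1, 13) if (m - month) % interval == 0)
-- ===== Notes on version B (the rewrite author's own statement) =====
-- stated objective: simpler
-- what changed: The interval dispatch becomes a data-driven helper (first-match scan of a (word, interval) table falling back to the code map), and the set comprehension {((month-1+i*interval)%12)+1 for i in range(12//interval)} plus sorted() is replaced by one ordered filter of range(1,13) by the congruence (m - month) % interval == 0 - no set, no sort.
import Mathlib
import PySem

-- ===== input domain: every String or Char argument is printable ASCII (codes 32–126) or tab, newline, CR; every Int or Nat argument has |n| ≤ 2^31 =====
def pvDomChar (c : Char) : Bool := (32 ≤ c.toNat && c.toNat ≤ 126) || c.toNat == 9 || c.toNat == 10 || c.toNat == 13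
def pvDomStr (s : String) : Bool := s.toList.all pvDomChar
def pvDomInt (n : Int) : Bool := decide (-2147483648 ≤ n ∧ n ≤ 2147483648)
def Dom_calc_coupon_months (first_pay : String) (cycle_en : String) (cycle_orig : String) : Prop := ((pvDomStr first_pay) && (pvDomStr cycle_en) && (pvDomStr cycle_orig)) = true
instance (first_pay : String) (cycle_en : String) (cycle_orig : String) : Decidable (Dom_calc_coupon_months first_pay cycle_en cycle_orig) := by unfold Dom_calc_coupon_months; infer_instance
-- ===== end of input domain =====

-- B replaces A's set-comprehension + sorted() by an ordered congruence filter over the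
-- 12 calendar months and turns the interval dispatch into a data-driven first-match table
-- (objective: simpler; same result proved for all inputs).


def pvMonthNames : List String :=
  ["Jan","Feb","Mar","Apr","May","Jun","Jul","Aug","Sep","Oct","Nov","Dec"]

-- ===== PORT A =====
def calc_coupon_months (first_pay : String) (cycle_en : String) (cycle_orig : String) : String :=
  if first_pay = "" ∨ first_pay = "—" then "—"
  else
    match PySem.Int.ofStr? (PySem.Str.slice first_pay (some 5) (some 7)) with
    | none => "—"   -- int() raised: bare except returns "—"
    | some month =>
      -- cv = cycle_en.lower(); the if/elif chain assigning interval, with the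
      -- 'if not interval: return f"(…)"' early exit encoded as the none branch
      match (if PySem.Str.isIn "monthly" (PySem.Str.lower cycle_en) then some (1 : Int)
             else if PySem.Str.isIn "quarterly" (PySem.Str.lower cycle_en) then some 3
             else if PySem.Str.isIn "semi" (PySem.Str.lower cycle_en) then some 6
             else if PySem.Str.isIn "annual" (PySem.Str.lower cycle_en) then some 12
             else if PySem.Dict.getD
                 (PySem.Dict.ofList [("1", (12 : Int)), ("2", 6), ("3", 3), ("4", 1)])
                 (PySem.Str.strip cycle_orig) 0 = 0 then none
             else some (PySem.Dict.getD
                 (PySem.Dict.ofList [("1", (12 : Int)), ("2", 6), ("3", 3), ("4", 1)])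
                 (PySem.Str.strip cycle_orig) 0)) with
      | none => "(" ++ (if cycle_en = "" then cycle_orig else cycle_en) ++ ")"
      | some interval =>
        -- months = sorted({((month-1+i*interval)%12)+1 for i in range(12//interval)})
        PySem.Str.join ", "
          ((PySem.List.sorted
              (PySem.Set.ofList ((PySem.List.pyRange 0 (PySem.Int.floordiv 12 interval) 1).map
                (fun i => PySem.Int.mod (month - 1 + i * interval) 12 + 1)))
              (fun m => m) false).map
            (fun m => (PySem.List.pyGet? pvMonthNames (m - 1)).getD ""))
          -- MONTH_NAMES[m-1]: m is always 1..12 here, so Python never raises; getD "" is unreachable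

-- ===== PORT B =====
def pvCycleWords : List (String × Int) :=
  [("monthly", 1), ("quarterly", 3), ("semi", 6), ("annual", 12)]

-- the 'for word, iv in _CYCLE_WORDS: if word in cv: return iv' loop
def pvFirstWord : List (String × Int) → String → Option Int
  | [], _ => none
  | (w, iv) :: rest, cv => if PySem.Str.isIn w cv then some iv else pvFirstWord rest cv

def pvInterval (cycle_en : String) (cycle_orig : String) : Int :=
  let cv := PySem.Str.lower cycle_en
  match pvFirstWord pvCycleWords cv with
  | some iv => iv
  | none => PySem.Dict.getD
      (PySem.Dict.ofList [("1", (12 : Int)), ("2", 6), ("3", 3), ("4", 1)])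
      (PySem.Str.strip cycle_orig) 0

def calc_coupon_months_alt (first_pay : String) (cycle_en : String) (cycle_orig : String) : String :=
  if first_pay = "" ∨ first_pay = "—" then "—"
  else
    match PySem.Int.ofStr? (PySem.Str.slice first_pay (some 5) (some 7)) with
    | none => "—"
    | some month =>
      if pvInterval cycle_en cycle_orig = 0 then
        "(" ++ (if cycle_en = "" then cycle_orig else cycle_en) ++ ")"
      else
        PySem.Str.join ", "
          (((PySem.List.pyRange 1 13 1).filter
              (fun m => PySem.Int.mod (m - month) (pvInterval cycle_en cycle_orig) == 0)).map
            (fun m => (PySem.List.pyGet? pvMonthNames (m - 1)).getD ""))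

-- ===== PRECONDITION & SPEC =====
def Spec_calc_coupon_months (first_pay : String) (cycle_en : String) (cycle_orig : String) (out : String) : Prop := out = calc_coupon_months_alt first_pay cycle_en cycle_orig
instance (first_pay : String) (cycle_en : String) (cycle_orig : String) (out : String) : Decidable (Spec_calc_coupon_months first_pay cycle_en cycle_orig out) := by unfold Spec_calc_coupon_months; infer_instance

-- ===== CLAIM (what is proved, stated in full; the proofs are below) =====
def Claim_equal_calc_coupon_months : Prop := ∀ (first_pay : String) (cycle_en : String) (cycle_orig : String), Dom_calc_coupon_months first_pay cycle_en cycle_orig → Spec_calc_coupon_months first_pay cycle_en cycle_orig (calc_coupon_months first_pay cycle_en cycle_orig)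

-- ===== LEMMAS AND PROOFS =====

-- A's interval? option is B's interval, with 0 playing the role of none
lemma pv_interval_bridge (cycle_en cycle_orig : String) :
    (if PySem.Str.isIn "monthly" (PySem.Str.lower cycle_en) then some (1 : Int)
     else if PySem.Str.isIn "quarterly" (PySem.Str.lower cycle_en) then some 3
     else if PySem.Str.isIn "semi" (PySem.Str.lower cycle_en) then some 6
     else if PySem.Str.isIn "annual" (PySem.Str.lower cycle_en) then some 12
     else if PySem.Dict.getD
         (PySem.Dict.ofList [("1", (12 : Int)), ("2", 6), ("3", 3), ("4", 1)])
         (PySem.Str.strip cycle_orig) 0 = 0 then none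
     else some (PySem.Dict.getD
         (PySem.Dict.ofList [("1", (12 : Int)), ("2", 6), ("3", 3), ("4", 1)])
         (PySem.Str.strip cycle_orig) 0))
    = (if pvInterval cycle_en cycle_orig = 0 then none else some (pvInterval cycle_en cycle_orig)) := by
  unfold pvInterval pvCycleWords
  simp only [pvFirstWord]
  split_ifs <;> simp_all

-- the interval is always one of 0, 1, 3, 6, 12
lemma pv_interval_mem (cycle_en cycle_orig : String) :
    pvInterval cycle_en cycle_orig = 0 ∨ pvInterval cycle_en cycle_orig = 1 ∨
    pvInterval cycle_en cycle_orig = 3 ∨ pvInterval cycle_en cycle_orig = 6 ∨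
    pvInterval cycle_en cycle_orig = 12 := by
  unfold pvInterval pvCycleWords
  simp only [pvFirstWord]
  have hD : PySem.Dict.ofList [("1", (12 : Int)), ("2", 6), ("3", 3), ("4", 1)]
      = PySem.Dict.mk [("1", 12), ("2", 6), ("3", 3), ("4", 1)] := rfl
  rw [hD]
  simp only [PySem.Dict.getD_eq_get?_getD, PySem.Dict.get?_mk_cons]
  split_ifs <;> simp_all [PySem.Dict.get?]

-- the heart: sorted set of residue-shifted months = ordered congruence filter
lemma pv_months_eq (month ivl : Int)
    (h : ivl = 1 ∨ ivl = 3 ∨ ivl = 6 ∨ ivl = 12) :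
    PySem.List.sorted
      (PySem.Set.ofList ((PySem.List.pyRange 0 (PySem.Int.floordiv 12 ivl) 1).map
        (fun i => PySem.Int.mod (month - 1 + i * ivl) 12 + 1)))
      (fun m => m) false
    = (PySem.List.pyRange 1 13 1).filter (fun m => PySem.Int.mod (m - month) ivl == 0) := by
  have key : ∀ r : Int, 0 ≤ r → r < 12 →
      PySem.List.sorted
        (PySem.Set.ofList ((PySem.List.pyRange 0 (PySem.Int.floordiv 12 ivl) 1).map
          (fun i => PySem.Int.mod (r - 1 + i * ivl) 12 + 1)))
        (fun m => m) false
      = (PySem.List.pyRange 1 13 1).filter (fun m => PySem.Int.mod (m - r) ivl == 0) := by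
    intro r h0 h1
    rcases h with h | h | h | h <;> subst h <;> interval_cases r <;> decide
  have hmap : (fun i => PySem.Int.mod (month - 1 + i * ivl) 12 + 1)
      = (fun i => PySem.Int.mod (month % 12 - 1 + i * ivl) 12 + 1) := by
    funext i
    rw [PySem.Int.mod_eq_emod_of_pos (by norm_num), PySem.Int.mod_eq_emod_of_pos (by norm_num)]
    rcases h with h | h | h | h <;> subst h <;> omega
  have hfilt : (fun m : Int => PySem.Int.mod (m - month) ivl == 0)
      = (fun m : Int => PySem.Int.mod (m - month % 12) ivl == 0) := by
    funext m
    rw [Bool.eq_iff_iff]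
    simp only [beq_iff_eq, PySem.Int.mod_eq_zero_iff_dvd]
    rcases h with h | h | h | h <;> subst h <;> omega
  rw [hmap, hfilt]
  exact key (month % 12) (by omega) (by omega)

-- ===== VERDICT (by name: the statement is the Claim_ definition above) =====
set_option maxHeartbeats 1000000 in
theorem calc_coupon_months_spec : Claim_equal_calc_coupon_months := by
  intro fp ce co _hd
  show calc_coupon_months fp ce co = calc_coupon_months_alt fp ce co
  unfold calc_coupon_months calc_coupon_months_alt
  by_cases h1 : fp = "" ∨ fp = "—"
  · rw [if_pos h1, if_pos h1]
  · rw [if_neg h1, if_neg h1]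
    cases hm : PySem.Int.ofStr? (PySem.Str.slice fp (some 5) (some 7)) with
    | none => rfl
    | some month =>
      dsimp only
      rw [pv_interval_bridge ce co]
      by_cases h0 : pvInterval ce co = 0
      · rw [if_pos h0, if_pos h0]
      · rw [if_neg h0, if_neg h0]
        dsimp only
        rcases pv_interval_mem ce co with h | h | h | h | h
        · exact absurd h h0
        · rw [h]; exact congrArg _ (congrArg _ (pv_months_eq month 1 (Or.inl rfl)))
        · rw [h]; exact congrArg _ (congrArg _ (pv_months_eq month 3 (Or.inr (Or.inl rfl))))
        · rw [h]; exact congrArg _ (congrArg _ (pv_months_eq month 6 (Or.inr (Or.inr (Or.inl rfl)))))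
        · rw [h]; exact congrArg _ (congrArg _ (pv_months_eq month 12 (Or.inr (Or.inr (Or.inr rfl)))))
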